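-- pv_equiv track=rewrite | github.com/tnotesjs/TNotes.leetcode | notes/2973. 树中每个节点放置的金币数目【困难】/solutions/1/1.py | placedCoins
-- ===== SOURCE A (Python) =====
-- def placedCoins(edges: list[list[int]], cost: list[int]) -> list[int]:
--     n = len(cost)
--     adj = [[] for _ in range(n)]
--     for u, v in edges:
--         adj[u].append(v)
--         adj[v].append(u)
--     ans = [0] * n
--     parent = [-1] * n
--     order = []
--     stack = [0]
--     visited = [False] * n
--     visited[0] = True
--     while stack:
--         u = stack.pop()
--         order.append(u)
--         for v in adj[u]:
--             if not visited[v]: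
--                 visited[v] = True
--                 parent[v] = u
--                 stack.append(v)
--     vals = [[] for _ in range(n)]
--     for u in reversed(order):
--         vals[u] = [cost[u]]
--         for v in adj[u]:
--             if v == parent[u]:
--                 continue
--             vals[u].extend(vals[v])
--         vals[u].sort()
--         sz = len(vals[u])
--         if sz >= 3:
--             c1 = vals[u][-1] * vals[u][-2] * vals[u][-3]
--             c2 = vals[u][0] * vals[u][1] * vals[u][-1]
--             ans[u] = max(0, c1, c2)
--         else:
--             ans[u] = 1
--         if sz > 5:
--             vals[u] = [vals[u][0], vals[u][1], vals[u][-3], vals[u][-2], vals[u][-1]]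
--     return ans
-- ===== SOURCE B (Python) =====
-- def merge(a, b):
--     # linear merge of two already-sorted lists
--     i = j = 0
--     out = []
--     while i < len(a) and j < len(b):
--         if a[i] <= b[j]:
--             out.append(a[i]); i += 1
--         else:
--             out.append(b[j]); j += 1
--     out.extend(a[i:])
--     out.extend(b[j:])
--     return out
--
-- def placedCoins(edges: list[list[int]], cost: list[int]) -> list[int]:
--     n = len(cost)
--     adj = [[] for _ in range(n)]
--     for u, v in edges:
--         adj[u].append(v)
--         adj[v].append(u)
--     ans = [0] * n
--     parent = [-1] * n
--     order = []
--     stack = [0]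
--     visited = [False] * n
--     visited[0] = True
--     while stack:
--         u = stack.pop()
--         order.append(u)
--         for v in adj[u]:
--             if not visited[v]:
--                 visited[v] = True
--                 parent[v] = u
--                 stack.append(v)
--     # Bottom-up: per node keep a SORTED bounded buffer (2 smallest ++ 3 largest of the
--     # subtree's costs); child buffers are already sorted, so build the node's sorted
--     # value list with linear merges -- no sorting anywhere.
--     buf = [[] for _ in range(n)]
--     for u in reversed(order):
--         cur = [cost[u]]
--         for v in adj[u]:
--             if v != parent[u]:
--                 cur = merge(cur, buf[v])
--         sz = len(cur)
--         if sz >= 3: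
--             ans[u] = max(0, cur[-1] * cur[-2] * cur[-3], cur[0] * cur[1] * cur[-1])
--         else:
--             ans[u] = 1
--         buf[u] = cur if sz <= 5 else [cur[0], cur[1], cur[-3], cur[-2], cur[-1]]
--     return ans
-- ===== Notes on version B (the rewrite author's own statement) =====
-- stated objective: alternative
-- what changed: The per-node combine no longer concatenates capped child lists and sorts them: each node keeps a sorted bounded buffer (2 smallest ++ 3 largest subtree costs) and builds its sorted value list by LINEAR MERGES of the already-sorted child buffers, so no sort is performed anywhere in the bottom-up pass.
-- outside the precondition, e.g. on placedCoins([[0, 0]], [2]): A returns [8], B returns [1]; on placedCoins([[0, 1], [1, 2], [2, 0]], [2, 3, 4]): A returns [36, 1, 1], B returns [36, 1, 1]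
import Mathlib
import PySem

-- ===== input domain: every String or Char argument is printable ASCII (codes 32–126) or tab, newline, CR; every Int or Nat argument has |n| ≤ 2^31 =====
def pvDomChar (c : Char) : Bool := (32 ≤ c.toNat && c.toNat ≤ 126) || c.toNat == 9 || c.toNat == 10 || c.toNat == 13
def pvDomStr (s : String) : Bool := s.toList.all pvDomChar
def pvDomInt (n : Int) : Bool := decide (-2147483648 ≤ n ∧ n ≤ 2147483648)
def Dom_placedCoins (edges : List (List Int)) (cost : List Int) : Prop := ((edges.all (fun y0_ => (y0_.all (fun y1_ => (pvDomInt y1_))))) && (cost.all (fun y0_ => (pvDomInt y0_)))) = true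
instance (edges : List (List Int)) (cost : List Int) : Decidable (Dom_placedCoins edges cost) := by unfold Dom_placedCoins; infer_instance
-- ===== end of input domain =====

-- B replaces A's per-node "concatenate capped child lists, then sort" by sorted bounded
-- buffers combined with hand-written LINEAR MERGES (no sort in the bottom-up pass);
-- the rooting DFS is textually identical in both Pythons, so the two ports share it
-- (objective: alternative).

-- ===== SHARED ROOTING PHASE (textually identical first two loops of Source A and Source B) =====
-- adj = [[] for _ in range(n)]; for u, v in edges: adj[u].append(v); adj[v].append(u)
-- (a malformed edge (not a 2-list) makes Python raise ValueError: outside Pre_, the port skips it)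
def pcBuildAdj (edges : List (List Int)) (n : Nat) : List (List Int) :=
  edges.foldl (fun adj e =>
    match e with
    | [u, v] =>
        let adj1 := PySem.List.pySetD adj u ((PySem.List.pyGetD adj u []) ++ [v])
        PySem.List.pySetD adj1 v ((PySem.List.pyGetD adj1 v []) ++ [u])
    | _ => adj) (List.replicate n [])

-- body of `for v in adj[u]: if not visited[v]: visited[v]=True; parent[v]=u; stack.append(v)`
-- state = (stack, visited, parent); the stack's top is the list head
def pcDfsStep (u : Int) (s : List Int × List Bool × List Int) (v : Int) :
    List Int × List Bool × List Int :=
  if PySem.List.pyGetD s.2.1 v true = false then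
    (v :: s.1, PySem.List.pySetD s.2.1 v true, PySem.List.pySetD s.2.2 v u)
  else s

lemma count_false_pySetD_true (l : List Bool) (v : Int)
    (h : PySem.List.pyGetD l v true = false) :
    (PySem.List.pySetD l v true).count false + 1 = l.count false := by
  rcases hk : PySem.List.pyIdx? l.length v with _ | k
  · exfalso
    simp [PySem.List.pyGetD, PySem.List.pyGet?, hk] at h
  · have hlt : k < l.length := by
      simp only [PySem.List.pyIdx?] at hk
      split_ifs at hk <;> simp_all <;> omega
    have hget : l[k] = false := by
      simp only [PySem.List.pyGetD, PySem.List.pyGet?, hk, Option.bind_some,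
        List.getElem?_eq_getElem hlt, Option.getD_some] at h
      exact h
    have hset : PySem.List.pySetD l v true = l.set k true := by
      simp only [PySem.List.pySetD, PySem.List.pySet?, hk, Option.map_some, Option.getD_some]
    have hpos : 0 < l.count false :=
      List.count_pos_iff.mpr (hget ▸ List.getElem_mem hlt)
    rw [hset]
    simp [List.count_set, hget, hlt]
    omega

lemma pcDfsStep_measure (u : Int) (s : List Int × List Bool × List Int) (v : Int) :
    (pcDfsStep u s v).1.length + 2 * ((pcDfsStep u s v).2.1.count false) ≤
      s.1.length + 2 * (s.2.1.count false) := by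
  unfold pcDfsStep
  split
  · rename_i h
    have := count_false_pySetD_true s.2.1 v h
    simp only [List.length_cons]
    omega
  · omega

lemma pcDfsFold_measure (u : Int) (l : List Int) (s : List Int × List Bool × List Int) :
    (l.foldl (pcDfsStep u) s).1.length + 2 * ((l.foldl (pcDfsStep u) s).2.1.count false) ≤
      s.1.length + 2 * (s.2.1.count false) := by
  induction l generalizing s with
  | nil => simp
  | cons v t ih =>
      simp only [List.foldl_cons]
      exact le_trans (ih _) (pcDfsStep_measure u s v)

-- while stack: u = stack.pop(); order.append(u); for v in adj[u]: …
def pcDfs (adj : List (List Int)) (stack : List Int) (visited : List Bool)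
    (parent : List Int) (order : List Int) : List Int × List Int :=
  match stack with
  | [] => (order, parent)
  | u :: rest =>
    let s := (PySem.List.pyGetD adj u []).foldl (pcDfsStep u) (rest, visited, parent)
    pcDfs adj s.1 s.2.1 s.2.2 (order ++ [u])
  termination_by stack.length + 2 * visited.count false
  decreasing_by
    have := pcDfsFold_measure u (PySem.List.pyGetD adj u []) (rest, visited, parent)
    dsimp only at this ⊢
    simp only [List.length_cons] at this ⊢
    omega

-- ===== PORT A =====
-- step of `for u in reversed(order): vals[u] = [cost[u]]; for v in adj[u]: … extend; sort; …`
-- with state (vals, ans)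
def sweepStepA (cost : List Int) (adj : List (List Int)) (parent : List Int)
    (s : List (List Int) × List Int) (u : Int) : List (List Int) × List Int :=
  let vals1 := PySem.List.pySetD s.1 u [PySem.List.pyGetD cost u 0]
  let p := PySem.List.pyGetD parent u 0
  let vals2 := (PySem.List.pyGetD adj u []).foldl
    (fun vs v => if v = p then vs
      else PySem.List.pySetD vs u ((PySem.List.pyGetD vs u []) ++ (PySem.List.pyGetD vs v [])))
    vals1
  let sv := PySem.List.sorted (PySem.List.pyGetD vals2 u []) (fun x => x) false
  let vals3 := PySem.List.pySetD vals2 u sv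
  let sz : Nat := sv.length
  let ans' := if 3 ≤ sz then
      let c1 := PySem.List.pyGetD sv (-1) 0 * PySem.List.pyGetD sv (-2) 0 * PySem.List.pyGetD sv (-3) 0
      let c2 := PySem.List.pyGetD sv 0 0 * PySem.List.pyGetD sv 1 0 * PySem.List.pyGetD sv (-1) 0
      PySem.List.pySetD s.2 u (max (max 0 c1) c2)
    else PySem.List.pySetD s.2 u 1
  let vals4 := if 5 < sz then
      PySem.List.pySetD vals3 u [PySem.List.pyGetD sv 0 0, PySem.List.pyGetD sv 1 0,
        PySem.List.pyGetD sv (-3) 0, PySem.List.pyGetD sv (-2) 0, PySem.List.pyGetD sv (-1) 0]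
    else vals3
  (vals4, ans')

def placedCoins (edges : List (List Int)) (cost : List Int) : List Int :=
  let n := cost.length
  let adj := pcBuildAdj edges n
  let visited := PySem.List.pySetD (List.replicate n false) 0 true
  let op := pcDfs adj [0] visited (List.replicate n (-1)) []
  (op.1.reverse.foldl (sweepStepA cost adj op.2)
    (List.replicate n ([] : List Int), List.replicate n (0 : Int))).2

-- ===== PORT B =====
-- def merge(a, b): linear merge of two already-sorted lists (the while-loop with two
-- cursors plus the trailing extends, transcribed as the standard two-list recursion)
def pcMerge : List Int → List Int → List Int
  | [], b => b
  | a, [] => a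
  | x :: xs, y :: ys =>
      if x ≤ y then x :: pcMerge xs (y :: ys) else y :: pcMerge (x :: xs) ys
  termination_by a b => a.length + b.length

-- step of `for u in reversed(order): cur = [cost[u]]; for v in adj[u]: if v != parent[u]:
-- cur = merge(cur, buf[v]); …` with state (buf, ans)
def sweepStepB (cost : List Int) (adj : List (List Int)) (parent : List Int)
    (s : List (List Int) × List Int) (u : Int) : List (List Int) × List Int :=
  let p := PySem.List.pyGetD parent u 0
  let cur := (PySem.List.pyGetD adj u []).foldl
    (fun c v => if v = p then c else pcMerge c (PySem.List.pyGetD s.1 v []))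
    [PySem.List.pyGetD cost u 0]
  let sz : Nat := cur.length
  let ans' := if 3 ≤ sz then
      PySem.List.pySetD s.2 u (max (max 0
        (PySem.List.pyGetD cur (-1) 0 * PySem.List.pyGetD cur (-2) 0 * PySem.List.pyGetD cur (-3) 0))
        (PySem.List.pyGetD cur 0 0 * PySem.List.pyGetD cur 1 0 * PySem.List.pyGetD cur (-1) 0))
    else PySem.List.pySetD s.2 u 1
  let buf' := if sz ≤ 5 then PySem.List.pySetD s.1 u cur
    else PySem.List.pySetD s.1 u [PySem.List.pyGetD cur 0 0, PySem.List.pyGetD cur 1 0,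
      PySem.List.pyGetD cur (-3) 0, PySem.List.pyGetD cur (-2) 0, PySem.List.pyGetD cur (-1) 0]
  (buf', ans')

def placedCoins_alt (edges : List (List Int)) (cost : List Int) : List Int :=
  let n := cost.length
  let adj := pcBuildAdj edges n
  let visited := PySem.List.pySetD (List.replicate n false) 0 true
  let op := pcDfs adj [0] visited (List.replicate n (-1)) []
  (op.1.reverse.foldl (sweepStepB cost adj op.2)
    (List.replicate n ([] : List Int), List.replicate n (0 : Int))).2

-- ===== PRECONDITION & SPEC =====
-- endpoints of one edge, as a finite set of labels
def edgeEnds (e : List Int) : Finset Int :=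
  match e with
  | [u, v] => {u, v}
  | _ => ∅

def edgeShape (n : Int) (e : List Int) : Bool :=
  match e with
  | [u, v] => decide (0 ≤ u ∧ u < n ∧ 0 ≤ v ∧ v < n)
  | _ => false

-- Pre_ is the problem's contract: at least one node, every edge a pair of node labels in
-- [0, n), and the edges form a forest (every nonempty edge subset spans more vertices than
-- it has edges: no self-loops, parallel edges or cycles).  It excludes inputs on which A
-- still returns: non-forest edge lists, where A's value is an accident of its in-place
-- list aliasing (a self-loop makes vals[u].extend(vals[u]) double the list) and neither
-- behaviour is specified.
def Pre_placedCoins (edges : List (List Int)) (cost : List Int) : Prop :=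
  1 ≤ cost.length ∧
  edges.all (edgeShape (cost.length : Int)) = true ∧
  ∀ S : Finset (Fin edges.length), S.Nonempty →
    S.card < (S.biUnion (fun i => edgeEnds edges[i])).card

instance (edges : List (List Int)) (cost : List Int) : Decidable (Pre_placedCoins edges cost) := by
  unfold Pre_placedCoins; infer_instance

def pvWitness_placedCoins : List (List Int) × List Int :=
  ([[0, 1], [2, 1]], [5, 2, 3])

def Spec_placedCoins (edges : List (List Int)) (cost : List Int) (out : List Int) : Prop :=
  out = placedCoins_alt edges cost
instance (edges : List (List Int)) (cost : List Int) (out : List Int) :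
    Decidable (Spec_placedCoins edges cost out) := by unfold Spec_placedCoins; infer_instance

-- ===== CLAIM (what is proved, stated in full; the proofs are below) =====
def Claim_equal_placedCoins : Prop := ∀ (edges : List (List Int)) (cost : List Int),
  Dom_placedCoins edges cost → Pre_placedCoins edges cost →
  Spec_placedCoins edges cost (placedCoins edges cost)

-- ===== LEMMAS AND PROOFS =====

-- -- basic pySetD/pyGetD index facts --

lemma pyGetD_pySetD_ne {α : Type} (xs : List α) (u v : Int) (w : α) (d : α)
    (hu : 0 ≤ u) (hv : 0 ≤ v) (hvlt : v < (xs.length : Int)) (hne : v ≠ u) :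
    PySem.List.pyGetD (PySem.List.pySetD xs u w) v d = PySem.List.pyGetD xs v d := by
  rw [PySem.List.pySetD_of_nonneg xs w hu,
      PySem.List.pyGetD_eq_getElem _ d hv (by simpa using hvlt),
      PySem.List.pyGetD_eq_getElem xs d hv hvlt]
  exact List.getElem_set_ne (by omega) _

lemma pyGetD_pySetD_self {α : Type} (xs : List α) (u : Int) (w : α) (d : α)
    (hu : 0 ≤ u) (hult : u < (xs.length : Int)) :
    PySem.List.pyGetD (PySem.List.pySetD xs u w) u d = w := by
  rw [PySem.List.pySetD_of_nonneg xs w hu,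
      PySem.List.pyGetD_eq_getElem _ d hu (by simpa using hult)]
  exact List.getElem_set_self _

lemma pySetD_pySetD_self {α : Type} (xs : List α) (u : Int) (a b : α) (hu : 0 ≤ u) :
    PySem.List.pySetD (PySem.List.pySetD xs u a) u b = PySem.List.pySetD xs u b := by
  rw [PySem.List.pySetD_of_nonneg xs a hu, PySem.List.pySetD_of_nonneg _ b hu,
      PySem.List.pySetD_of_nonneg xs b hu, List.set_set]

lemma mem_pyGetD_nil {α : Type} (xs : List (List α)) (i : Int) (x : α)
    (h : x ∈ PySem.List.pyGetD xs i []) : ∃ l ∈ xs, x ∈ l := by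
  unfold PySem.List.pyGetD at h
  rcases hg : PySem.List.pyGet? xs i with _ | l
  · rw [hg] at h; simp at h
  · rw [hg] at h
    exact ⟨l, PySem.List.mem_of_pyGet?_eq_some xs hg, h⟩

lemma pairwise_pyGetD_nil {α : Type} (P : List α → Prop) (xs : List (List α)) (i : Int)
    (hP : ∀ l ∈ xs, P l) (hnil : P []) : P (PySem.List.pyGetD xs i []) := by
  unfold PySem.List.pyGetD
  rcases hg : PySem.List.pyGet? xs i with _ | l
  · exact hnil
  · exact hP l (PySem.List.mem_of_pyGet?_eq_some xs hg)

lemma mem_pySetD {α : Type} {x : α} {xs : List α} {i : Int} {v : α}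
    (h : x ∈ PySem.List.pySetD xs i v) : x ∈ xs ∨ x = v := by
  unfold PySem.List.pySetD PySem.List.pySet? at h
  rcases hk : PySem.List.pyIdx? xs.length i with _ | k
  · rw [hk] at h; exact Or.inl h
  · rw [hk] at h; exact List.mem_or_eq_of_mem_set h

-- -- merge lemmas --

lemma pcMerge_perm (a b : List Int) : (pcMerge a b).Perm (a ++ b) := by
  fun_induction pcMerge a b with
  | case1 b => simp
  | case2 a h => simp
  | case3 x xs y ys h ih => exact ih.cons x
  | case4 x xs y ys h ih => exact ((ih.cons y).trans (List.perm_middle).symm)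

lemma mem_pcMerge {x : Int} {a b : List Int} (h : x ∈ pcMerge a b) : x ∈ a ∨ x ∈ b := by
  simpa using (pcMerge_perm a b).mem_iff.mp h

lemma pcMerge_pairwise (a b : List Int)
    (ha : a.Pairwise (· ≤ ·)) (hb : b.Pairwise (· ≤ ·)) :
    (pcMerge a b).Pairwise (· ≤ ·) := by
  fun_induction pcMerge a b with
  | case1 b => exact hb
  | case2 a h => exact ha
  | case3 x xs y ys h ih =>
      rcases List.pairwise_cons.mp ha with ⟨hx, ha'⟩
      refine List.pairwise_cons.mpr ⟨?_, ih ha' hb⟩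
      intro z hz
      rcases mem_pcMerge hz with hz | hz
      · exact hx z hz
      · rcases List.mem_cons.mp hz with rfl | hz
        · exact h
        · exact le_trans h ((List.pairwise_cons.mp hb).1 z hz)
  | case4 x xs y ys h ih =>
      rcases List.pairwise_cons.mp hb with ⟨hy, hb'⟩
      refine List.pairwise_cons.mpr ⟨?_, ih ha hb'⟩
      intro z hz
      rcases mem_pcMerge hz with hz | hz
      · rcases List.mem_cons.mp hz with rfl | hz
        · omega
        · exact le_trans (by omega) ((List.pairwise_cons.mp ha).1 z hz)
      · exact hy z hz

lemma pairwise_getElem_mono {l : List Int} (h : l.Pairwise (· ≤ ·)) {i j : Nat}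
    (hij : i ≤ j) (hj : j < l.length) : l[i] ≤ l[j] := by
  rcases lt_or_eq_of_le hij with hlt | rfl
  · exact List.pairwise_iff_getElem.mp h i j (by omega) hj hlt
  · exact le_refl _

lemma pairwise_five {x0 x1 x2 x3 x4 : Int} (h01 : x0 ≤ x1) (h12 : x1 ≤ x2) (h23 : x2 ≤ x3)
    (h34 : x3 ≤ x4) : List.Pairwise (· ≤ ·) [x0, x1, x2, x3, x4] := by
  simp only [List.pairwise_cons, List.mem_cons, List.not_mem_nil, or_false]
  exact ⟨by rintro z (rfl|rfl|rfl|rfl) <;> omega,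
         by rintro z (rfl|rfl|rfl) <;> omega,
         by rintro z (rfl|rfl) <;> omega,
         by rintro z rfl; omega,
         fun z h => h.elim,
         List.Pairwise.nil⟩

-- -- the two inner folds compute, over entry u, the same multiset --

lemma sweepA_fold_char (vs0 : List (List Int)) (u p : Int) (L : List Int) (acc : List Int)
    (hu : 0 ≤ u) (hult : u < (vs0.length : Int))
    (hL : ∀ v ∈ L, 0 ≤ v ∧ v < (vs0.length : Int) ∧ v ≠ u) :
    L.foldl (fun vs v => if v = p then vs
        else PySem.List.pySetD vs u ((PySem.List.pyGetD vs u []) ++ (PySem.List.pyGetD vs v [])))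
      (PySem.List.pySetD vs0 u acc)
    = PySem.List.pySetD vs0 u
        (L.foldl (fun a v => if v = p then a else a ++ PySem.List.pyGetD vs0 v []) acc) := by
  induction L generalizing acc with
  | nil => rfl
  | cons v L ih =>
    have hv := hL v (List.mem_cons_self ..)
    simp only [List.foldl_cons]
    by_cases hvp : v = p
    · rw [if_pos hvp, if_pos hvp]
      exact ih acc (fun w hw => hL w (List.mem_cons_of_mem _ hw))
    · rw [if_neg hvp, if_neg hvp,
          pyGetD_pySetD_self vs0 u acc [] hu hult,
          pyGetD_pySetD_ne vs0 u v acc [] hu hv.1 hv.2.1 hv.2.2,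
          pySetD_pySetD_self vs0 u acc _ hu]
      exact ih _ (fun w hw => hL w (List.mem_cons_of_mem _ hw))

lemma foldAppend_perm_congr (g : Int → List Int) (p : Int) (L : List Int)
    {a1 a2 : List Int} (h : a1.Perm a2) :
    (L.foldl (fun a v => if v = p then a else a ++ g v) a1).Perm
      (L.foldl (fun a v => if v = p then a else a ++ g v) a2) := by
  induction L generalizing a1 a2 with
  | nil => simpa using h
  | cons v L ih =>
    simp only [List.foldl_cons]
    by_cases hvp : v = p
    · rw [if_pos hvp, if_pos hvp]; exact ih h
    · rw [if_neg hvp, if_neg hvp]; exact ih (h.append_right (g v))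

lemma sweepB_fold_char (vs0 : List (List Int)) (p : Int) (L : List Int) (acc : List Int)
    (hacc : acc.Pairwise (· ≤ ·)) (hs : ∀ l ∈ vs0, l.Pairwise (· ≤ ·)) :
    (L.foldl (fun c v => if v = p then c else pcMerge c (PySem.List.pyGetD vs0 v [])) acc).Pairwise (· ≤ ·) ∧
    (L.foldl (fun c v => if v = p then c else pcMerge c (PySem.List.pyGetD vs0 v [])) acc).Perm
      (L.foldl (fun a v => if v = p then a else a ++ PySem.List.pyGetD vs0 v []) acc) := by
  induction L generalizing acc with
  | nil => exact ⟨hacc, List.Perm.refl _⟩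
  | cons v L ih =>
    simp only [List.foldl_cons]
    by_cases hvp : v = p
    · rw [if_pos hvp, if_pos hvp]; exact ih acc hacc
    · rw [if_neg hvp, if_neg hvp]
      have hgv : (PySem.List.pyGetD vs0 v []).Pairwise (· ≤ ·) :=
        pairwise_pyGetD_nil _ vs0 v hs (by simp)
      have hm := pcMerge_pairwise acc (PySem.List.pyGetD vs0 v []) hacc hgv
      rcases ih (pcMerge acc (PySem.List.pyGetD vs0 v [])) hm with ⟨hpw, hperm⟩
      exact ⟨hpw, hperm.trans (foldAppend_perm_congr _ p L
        (pcMerge_perm acc (PySem.List.pyGetD vs0 v [])))⟩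

-- -- the condition under which one sweep step of A equals one of B --

def pcCond (n : Nat) (adj : List (List Int)) (u : Int) : Prop :=
  0 ≤ u ∧ u < (n : Int) ∧
  ∀ v ∈ PySem.List.pyGetD adj u [], 0 ≤ v ∧ v < (n : Int) ∧ v ≠ u

lemma sweepStep_eq (cost : List Int) (adj : List (List Int)) (parent : List Int)
    (s : List (List Int) × List Int) (u : Int)
    (hs : ∀ l ∈ s.1, l.Pairwise (· ≤ ·))
    (hc : pcCond s.1.length adj u) :
    sweepStepA cost adj parent s u = sweepStepB cost adj parent s u := by
  obtain ⟨hu, hult, hadj⟩ := hc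
  have hchar := sweepA_fold_char s.1 u (PySem.List.pyGetD parent u 0)
    (PySem.List.pyGetD adj u []) [PySem.List.pyGetD cost u 0] hu hult hadj
  have hB := sweepB_fold_char s.1 (PySem.List.pyGetD parent u 0)
    (PySem.List.pyGetD adj u []) [PySem.List.pyGetD cost u 0] (by simp) hs
  simp only [sweepStepA, sweepStepB]
  set p := PySem.List.pyGetD parent u 0 with hp
  set curA := (PySem.List.pyGetD adj u []).foldl
    (fun a v => if v = p then a else a ++ PySem.List.pyGetD s.1 v [])
    [PySem.List.pyGetD cost u 0] with hcurA
  set cur := (PySem.List.pyGetD adj u []).foldl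
    (fun c v => if v = p then c else pcMerge c (PySem.List.pyGetD s.1 v []))
    [PySem.List.pyGetD cost u 0] with hcur
  have hsorted : PySem.List.sorted curA (fun x => x) false = cur :=
    PySem.List.sorted_id_eq_of_perm_of_pairwise curA cur hB.2 hB.1
  rw [hchar, pyGetD_pySetD_self s.1 u curA [] hu hult, hsorted,
      pySetD_pySetD_self s.1 u curA cur hu]
  by_cases h5 : 5 < cur.length
  · rw [if_pos h5, if_neg (show ¬ cur.length ≤ 5 by omega),
        pySetD_pySetD_self s.1 u cur _ hu]
  · rw [if_neg h5, if_pos (show cur.length ≤ 5 by omega)]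

lemma sweepStepB_fst (cost : List Int) (adj : List (List Int)) (parent : List Int)
    (s : List (List Int) × List Int) (u : Int)
    (hs : ∀ l ∈ s.1, l.Pairwise (· ≤ ·)) :
    (∀ l ∈ (sweepStepB cost adj parent s u).1, l.Pairwise (· ≤ ·)) ∧
    (sweepStepB cost adj parent s u).1.length = s.1.length := by
  have hB := sweepB_fold_char s.1 (PySem.List.pyGetD parent u 0)
    (PySem.List.pyGetD adj u []) [PySem.List.pyGetD cost u 0] (by simp) hs
  simp only [sweepStepB]
  set cur := (PySem.List.pyGetD adj u []).foldl
    (fun c v => if v = PySem.List.pyGetD parent u 0 then c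
      else pcMerge c (PySem.List.pyGetD s.1 v []))
    [PySem.List.pyGetD cost u 0] with hcur
  by_cases h5 : cur.length ≤ 5
  · rw [if_pos h5]
    refine ⟨fun l hl => ?_, PySem.List.length_pySetD _ _ _⟩
    rcases mem_pySetD hl with hl | rfl
    · exact hs l hl
    · exact hB.1
  · rw [if_neg h5]
    refine ⟨fun l hl => ?_, PySem.List.length_pySetD _ _ _⟩
    rcases mem_pySetD hl with hl | rfl
    · exact hs l hl
    · have hlen6 : 5 < cur.length := by omega
      have e0 : cur.getD 0 0 = cur[0]'(by omega) := List.getD_eq_getElem _ _ (by omega)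
      have e1 : cur.getD 1 0 = cur[1]'(by omega) := List.getD_eq_getElem _ _ (by omega)
      rw [PySem.List.pyGetD_ofNat' cur 0 0, PySem.List.pyGetD_ofNat' cur 1 0,
          PySem.List.pyGetD_neg_ofNat cur 3 0 (by omega) (by omega),
          PySem.List.pyGetD_neg_ofNat cur 2 0 (by omega) (by omega),
          PySem.List.pyGetD_neg_ofNat cur 1 0 (by omega) (by omega), e0, e1]
      exact pairwise_five
        (pairwise_getElem_mono hB.1 (by omega) (by omega))
        (pairwise_getElem_mono hB.1 (by omega) (by omega))
        (pairwise_getElem_mono hB.1 (by omega) (by omega))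
        (pairwise_getElem_mono hB.1 (by omega) (by omega))

lemma sweep_fold_eq (cost : List Int) (adj : List (List Int)) (parent : List Int)
    (us : List Int) (s : List (List Int) × List Int)
    (hs : ∀ l ∈ s.1, l.Pairwise (· ≤ ·))
    (hus : ∀ u ∈ us, pcCond s.1.length adj u) :
    us.foldl (sweepStepA cost adj parent) s = us.foldl (sweepStepB cost adj parent) s := by
  induction us generalizing s with
  | nil => rfl
  | cons u us ih =>
    have hc := hus u (List.mem_cons_self ..)
    simp only [List.foldl_cons]
    rw [sweepStep_eq cost adj parent s u hs hc]
    have hinv := sweepStepB_fst cost adj parent s u hs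
    exact ih _ hinv.1 (fun w hw => hinv.2 ▸ hus w (List.mem_cons_of_mem _ hw))

-- -- traversal: every emitted node is the root or an adjacency-list entry --

lemma pcDfsFold_stack_mem (u : Int) (L : List Int) (s : List Int × List Bool × List Int)
    {x : Int} (h : x ∈ (L.foldl (pcDfsStep u) s).1) : x ∈ s.1 ∨ x ∈ L := by
  induction L generalizing s with
  | nil => exact Or.inl h
  | cons v L ih =>
    simp only [List.foldl_cons] at h
    rcases ih _ h with hx | hx
    · unfold pcDfsStep at hx
      split at hx
      · rcases List.mem_cons.mp hx with rfl | hx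
        · exact Or.inr (List.mem_cons_self ..)
        · exact Or.inl hx
      · exact Or.inl hx
    · exact Or.inr (List.mem_cons_of_mem _ hx)

lemma pcDfs_order_mem (adj : List (List Int)) (stack : List Int) (visited : List Bool)
    (parent : List Int) (order : List Int) {x : Int}
    (h : x ∈ (pcDfs adj stack visited parent order).1) :
    x ∈ order ∨ x ∈ stack ∨ ∃ l ∈ adj, x ∈ l := by
  induction stack, visited, parent, order using pcDfs.induct adj with
  | case1 visited parent order =>
    rw [pcDfs] at h
    exact Or.inl h
  | case2 visited parent order u rest s ih =>
    rw [pcDfs] at h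
    rcases ih h with hx | hx | hx
    · rcases List.mem_append.mp hx with hx | hx
      · exact Or.inl hx
      · have hxu : x = u := by simpa using hx
        exact Or.inr (Or.inl (hxu ▸ List.mem_cons_self ..))
    · rcases pcDfsFold_stack_mem u _ _ hx with hx | hx
      · exact Or.inr (Or.inl (List.mem_cons_of_mem _ hx))
      · exact Or.inr (Or.inr (mem_pyGetD_nil adj u x hx))
    · exact Or.inr (Or.inr hx)

-- -- the built adjacency structure: right length, in-range entries, no self-entry --

def adjInv (n : Nat) (adj : List (List Int)) : Prop :=
  adj.length = n ∧
  (∀ l ∈ adj, ∀ x ∈ l, 0 ≤ x ∧ x < (n : Int)) ∧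
  (∀ (k : Nat) (hk : k < adj.length), ((k : Int) ∉ adj[k]))

lemma addArc_inv {n : Nat} {adj : List (List Int)} (hinv : adjInv n adj)
    {a b : Int} (ha : 0 ≤ a) (halt : a < (n : Int)) (hb : 0 ≤ b) (hblt : b < (n : Int))
    (hab : a ≠ b) :
    adjInv n (PySem.List.pySetD adj a ((PySem.List.pyGetD adj a []) ++ [b])) := by
  obtain ⟨hlen, hmem, hloop⟩ := hinv
  have haN : a.toNat < adj.length := by omega
  have hget : PySem.List.pyGetD adj a [] = adj[a.toNat] :=
    PySem.List.pyGetD_eq_getElem adj [] ha (by omega)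
  rw [PySem.List.pySetD_of_nonneg adj _ ha]
  refine ⟨by simpa using hlen, ?_, ?_⟩
  · intro l hl x hx
    rcases List.mem_or_eq_of_mem_set hl with hl | rfl
    · exact hmem l hl x hx
    · rcases List.mem_append.mp hx with hx | hx
      · rw [hget] at hx
        exact hmem _ (List.getElem_mem haN) x hx
      · rcases List.mem_singleton.mp hx with rfl
        exact ⟨hb, hblt⟩
  · intro k hk
    have hk' : k < adj.length := by simpa using hk
    by_cases hka : k = a.toNat
    · subst hka
      rw [List.getElem_set_self]
      intro hmem'
      rcases List.mem_append.mp hmem' with hx | hx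
      · rw [hget] at hx
        exact hloop a.toNat haN hx
      · have hba : (↑a.toNat : Int) = b := List.mem_singleton.mp hx
        rw [Int.toNat_of_nonneg ha] at hba
        exact hab hba
    · rw [List.getElem_set_ne (by omega)]
      exact hloop k hk'

lemma replicate_inv (n : Nat) : adjInv n (List.replicate n ([] : List Int)) := by
  refine ⟨by simp, ?_, ?_⟩
  · intro l hl x hx
    rcases List.eq_of_mem_replicate hl
    cases hx
  · intro k hk
    simp

lemma pcBuildAdj_inv (edges : List (List Int)) (n : Nat)
    (hE : ∀ e ∈ edges, ∃ a b, e = [a, b] ∧ 0 ≤ a ∧ a < (n : Int) ∧ 0 ≤ b ∧ b < (n : Int) ∧ a ≠ b) :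
    adjInv n (pcBuildAdj edges n) := by
  unfold pcBuildAdj
  suffices h : ∀ adj0, adjInv n adj0 →
      adjInv n (edges.foldl (fun adj e =>
        match e with
        | [u, v] =>
            let adj1 := PySem.List.pySetD adj u ((PySem.List.pyGetD adj u []) ++ [v])
            PySem.List.pySetD adj1 v ((PySem.List.pyGetD adj1 v []) ++ [u])
        | _ => adj) adj0) by
    exact h _ (replicate_inv n)
  induction edges with
  | nil => intro adj0 h0; exact h0
  | cons e t ih =>
    intro adj0 h0
    obtain ⟨a, b, rfl, ha, halt, hb, hblt, hab⟩ := hE e (List.mem_cons_self ..)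
    simp only [List.foldl_cons]
    refine ih (fun e he => hE e (List.mem_cons_of_mem _ he)) _ ?_
    exact addArc_inv (addArc_inv h0 ha halt hb hblt hab) hb hblt ha halt (Ne.symm hab)

lemma cond_of_inv {n : Nat} {adj : List (List Int)} (hinv : adjInv n adj)
    {u : Int} (hu : 0 ≤ u) (hult : u < (n : Int)) : pcCond n adj u := by
  obtain ⟨hlen, hmem, hloop⟩ := hinv
  refine ⟨hu, hult, ?_⟩
  have huN : u.toNat < adj.length := by omega
  have hget : PySem.List.pyGetD adj u [] = adj[u.toNat] :=
    PySem.List.pyGetD_eq_getElem adj [] hu (by omega)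
  intro v hv
  rw [hget] at hv
  have hb := hmem _ (List.getElem_mem huN) v hv
  refine ⟨hb.1, hb.2, fun hvu => ?_⟩
  subst hvu
  have hnl := hloop v.toNat huN
  rw [Int.toNat_of_nonneg hu] at hnl
  exact hnl hv

-- -- extracting the edge facts from Pre_ --

lemma pre_edges_shape {edges : List (List Int)} {cost : List Int}
    (hpre : Pre_placedCoins edges cost) :
    ∀ e ∈ edges, ∃ a b, e = [a, b] ∧ 0 ≤ a ∧ a < (cost.length : Int) ∧ 0 ≤ b ∧
      b < (cost.length : Int) ∧ a ≠ b := by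
  obtain ⟨hn, hall, hforest⟩ := hpre
  intro e he
  have hs := List.all_eq_true.mp hall e he
  match e, hs with
  | [a, b], hs =>
    refine ⟨a, b, rfl, ?_⟩
    have hbounds : 0 ≤ a ∧ a < (cost.length : Int) ∧ 0 ≤ b ∧ b < (cost.length : Int) := by
      simpa [edgeShape] using hs
    obtain ⟨i, hi, hei⟩ := List.getElem_of_mem he
    refine ⟨hbounds.1, hbounds.2.1, hbounds.2.2.1, hbounds.2.2.2, ?_⟩
    intro hab
    subst hab
    have h1 := hforest {⟨i, hi⟩} ⟨⟨i, hi⟩, Finset.mem_singleton_self _⟩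
    rw [Finset.singleton_biUnion, Finset.card_singleton] at h1
    simp only [Fin.getElem_fin, hei] at h1
    simp [edgeEnds] at h1

-- ===== VERDICT (by name: the statement is the Claim_ definition above) =====
theorem placedCoins_spec : Claim_equal_placedCoins := by
  intro edges cost hdom hpre
  unfold Spec_placedCoins
  have hn : 1 ≤ cost.length := hpre.1
  have hE := pre_edges_shape hpre
  have hinv : adjInv cost.length (pcBuildAdj edges cost.length) :=
    pcBuildAdj_inv edges cost.length hE
  simp only [placedCoins, placedCoins_alt]
  set n := cost.length with hnn
  set adj := pcBuildAdj edges n with hadjdef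
  set op := pcDfs adj [0] (PySem.List.pySetD (List.replicate n false) 0 true)
    (List.replicate n (-1)) [] with hop
  have hfold := sweep_fold_eq cost adj op.2 op.1.reverse
    (List.replicate n ([] : List Int), List.replicate n (0 : Int))
    (by intro l hl
        rcases List.eq_of_mem_replicate hl
        exact List.Pairwise.nil)
    (by intro u hu
        have hmem : u ∈ op.1 := List.mem_reverse.mp hu
        have hcases := pcDfs_order_mem adj [0]
          (PySem.List.pySetD (List.replicate n false) 0 true) (List.replicate n (-1)) [] hmem
        have hlen : (List.replicate n ([] : List Int), List.replicate n (0 : Int)).1.length = n :=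
          List.length_replicate
        rw [hlen]
        rcases hcases with hx | hx | ⟨l, hl, hx⟩
        · simp at hx
        · have : u = 0 := by simpa using hx
          subst this
          exact cond_of_inv hinv (le_refl 0) (by exact_mod_cast hn)
        · have hb := hinv.2.1 l hl u hx
          exact cond_of_inv hinv hb.1 hb.2)
  rw [hfold]
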